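-- pv_equiv track=rewrite | github.com/hghimanshu/CodeForces-problems | 390B-Inna_Dima_Song.py | checkJoy
-- ===== SOURCE A (Python) =====
-- import itertools
--
-- def checkJoy(a, b):
--     joy = 0
--
--     for i in range(len(a)):
--         inna = list(range(1, a[i] +1))
--         dima = list(range(1, a[i] +1))
--         val = list(itertools.product(inna, dima))
--         val = [j for j in val if sum(j) == b[i]]
--         if len(val) == 0:
--             joy -=1
--         else:
--             val = sorted(val, reverse=True,key=lambda x:(x[0]*x[1]))[0]
--             joy += val[0]*val[1]
--     return joy
-- ===== SOURCE B (Python) =====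
-- def checkJoy(a, b):
--     joy = 0
--     for n, t in zip(a, b):
--         x = t // 2          # lower half of the split; upper half y = t - x
--         y = t - x
--         if 1 <= x and y <= n:
--             joy += x * y
--         else:
--             joy -= 1
--     return joy
-- ===== Notes on version B (the rewrite author's own statement) =====
-- stated objective: faster
-- what changed: Instead of enumerating all pairs (x,y) in [1,a[i]]^2, filtering those summing to b[i] and sorting by product, B picks the optimal split x=b[i]//2, y=b[i]-x directly and checks it is feasible, O(1) per element.
-- outside the precondition, e.g. on checkJoy([0], []): A returns -1, B returns 0; on checkJoy([92, 0, 194, 0], [10, 0, 0]): A returns 22, B returns 23; on checkJoy([2], []): A raises IndexError, B returns 0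
import Mathlib
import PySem

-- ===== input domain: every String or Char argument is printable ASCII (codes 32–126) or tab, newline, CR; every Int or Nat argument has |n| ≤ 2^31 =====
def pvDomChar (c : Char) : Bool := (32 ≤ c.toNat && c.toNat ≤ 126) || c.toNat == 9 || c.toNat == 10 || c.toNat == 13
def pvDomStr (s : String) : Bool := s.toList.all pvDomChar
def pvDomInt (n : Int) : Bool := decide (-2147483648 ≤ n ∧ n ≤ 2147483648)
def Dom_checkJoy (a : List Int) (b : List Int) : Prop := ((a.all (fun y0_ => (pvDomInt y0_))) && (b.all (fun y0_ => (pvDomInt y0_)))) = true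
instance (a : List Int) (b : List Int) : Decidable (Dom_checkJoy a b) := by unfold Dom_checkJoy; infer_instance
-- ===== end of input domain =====

-- B replaces A's enumerate-filter-sort over all pairs by directly testing the balanced split b[i]//2, b[i]-b[i]//2 (O(1) per element).

-- ===== PORT A =====
def checkJoy (a : List Int) (b : List Int) : Int :=
  (PySem.List.pyRange 0 a.length 1).foldl (fun joy i =>
    let ai := PySem.List.pyGetD a i 0
    let inna := PySem.List.pyRange 1 (ai + 1) 1
    let dima := PySem.List.pyRange 1 (ai + 1) 1
    let val := inna.flatMap (fun x => dima.map (fun y => (x, y)))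
    let val := val.filter (fun j => j.1 + j.2 == PySem.List.pyGetD b i 0)
    if val.length = 0 then joy - 1
    else
      let v := PySem.List.pyGetD (PySem.List.sorted val (fun x => x.1 * x.2) true) 0 (0, 0)
      joy + v.1 * v.2) 0

-- ===== PORT B =====
def checkJoy_alt (a : List Int) (b : List Int) : Int :=
  (a.zip b).foldl (fun joy nt =>
    let x := PySem.Int.floordiv nt.2 2
    let y := nt.2 - x
    if 1 ≤ x ∧ y ≤ nt.1 then joy + x * y else joy - 1) 0

-- ===== PRECONDITION & SPEC =====
-- Pre_ excludes mismatched lengths (len(b) < len(a)): there A raises IndexError as soon as some trailing a[i] >= 1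
-- forces b[i] to be evaluated, and where every trailing a[i] <= 0 A's return of extra -1 contributions for unpaired elements is an
-- accident of lazy evaluation of b[i] in an empty comprehension, a corner no caller of this pairwise function would specify.
def Pre_checkJoy (a : List Int) (b : List Int) : Prop := a.length ≤ b.length
instance (a : List Int) (b : List Int) : Decidable (Pre_checkJoy a b) := by unfold Pre_checkJoy; infer_instance
def pvWitness_checkJoy : List Int × List Int := ([3, 2], [4, 7])

def Spec_checkJoy (a : List Int) (b : List Int) (out : Int) : Prop := out = checkJoy_alt a b
instance (a : List Int) (b : List Int) (out : Int) : Decidable (Spec_checkJoy a b out) := by unfold Spec_checkJoy; infer_instance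

-- ===== CLAIM (what is proved, stated in full; the proofs are below) =====
def Claim_equal_checkJoy : Prop := ∀ (a : List Int) (b : List Int), Dom_checkJoy a b → Pre_checkJoy a b → Spec_checkJoy a b (checkJoy a b)

-- ===== LEMMAS AND PROOFS =====

-- A's per-element contribution, as a function of n = a[i], t = b[i].
def valA (n t : Int) : List (Int × Int) :=
  ((PySem.List.pyRange 1 (n + 1) 1).flatMap
      (fun x => (PySem.List.pyRange 1 (n + 1) 1).map (fun y => (x, y)))).filter
      (fun j => j.1 + j.2 == t)

def cA (n t : Int) : Int :=
  if (valA n t).length = 0 then -1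
  else
    let v := PySem.List.pyGetD (PySem.List.sorted (valA n t) (fun x => x.1 * x.2) true) 0 (0, 0)
    v.1 * v.2

def cB (n t : Int) : Int :=
  let x := PySem.Int.floordiv t 2
  let y := t - x
  if 1 ≤ x ∧ y ≤ n then x * y else -1

theorem mem_valA {n t : Int} {j : Int × Int} :
    j ∈ valA n t ↔ (1 ≤ j.1 ∧ j.1 ≤ n) ∧ (1 ≤ j.2 ∧ j.2 ≤ n) ∧ j.1 + j.2 = t := by
  unfold valA
  simp [List.mem_filter, List.mem_flatMap, PySem.List.mem_pyRange_one]
  constructor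
  · rintro ⟨⟨x, ⟨hx1, hx2⟩, y, ⟨hy1, hy2⟩, rfl⟩, hsum⟩
    exact ⟨⟨hx1, by omega⟩, ⟨hy1, by omega⟩, hsum⟩
  · rintro ⟨⟨h1, h2⟩, ⟨h3, h4⟩, h5⟩
    exact ⟨⟨j.1, ⟨h1, by omega⟩, j.2, ⟨h3, by omega⟩, rfl⟩, h5⟩

theorem floordiv_two (t : Int) : PySem.Int.floordiv t 2 = t / 2 :=
  PySem.Int.floordiv_eq_ediv_of_pos (by omega)

-- the balanced split is a maximizer: any feasible product is at most x*y
theorem prod_le (t p q : Int) (hsum : p + q = t) :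
    p * q ≤ (t / 2) * (t - t / 2) := by
  set x := t / 2 with hx
  have key : 0 ≤ (p - x) * (p - (t - x)) := by
    by_cases hp : p ≤ x
    · have h1 : p - x ≤ 0 := by omega
      have h2 : p - (t - x) ≤ 0 := by omega
      nlinarith
    · exact mul_nonneg (by omega) (by omega)
  have hq : q = t - p := by omega
  subst hq
  linarith [key, show x * (t - x) - p * (t - p) = (p - x) * (p - (t - x)) from by ring]

theorem valA_ne_nil_iff (n t : Int) :
    valA n t ≠ [] ↔ 1 ≤ t / 2 ∧ t - t / 2 ≤ n := by
  rw [← List.isEmpty_eq_false_iff, List.isEmpty_eq_false_iff_exists_mem]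
  constructor
  · rintro ⟨j, hj⟩
    rw [mem_valA] at hj
    obtain ⟨⟨h1, h2⟩, ⟨h3, h4⟩, h5⟩ := hj
    omega
  · rintro ⟨h1, h2⟩
    exact ⟨(t / 2, t - t / 2), mem_valA.mpr (by constructor <;> omega)⟩

theorem cA_eq_cB (n t : Int) : cA n t = cB n t := by
  unfold cA cB
  rw [floordiv_two]
  by_cases hne : valA n t = []
  · rw [if_pos (by simp [hne])]
    rw [if_neg]
    intro hc
    exact ((valA_ne_nil_iff n t).mpr hc) hne
  · have hnz : (valA n t).length ≠ 0 := by simp [hne]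
    rw [if_neg hnz]
    obtain ⟨h1, h2⟩ := (valA_ne_nil_iff n t).mp hne
    rw [if_pos ⟨h1, h2⟩]
    -- head of the descending sort attains the maximal product
    obtain ⟨m, tl, hs⟩ : ∃ m tl, PySem.List.sorted (valA n t) (fun x => x.1 * x.2) true = m :: tl := by
      rcases h : PySem.List.sorted (valA n t) (fun x => x.1 * x.2) true with _ | ⟨m, tl⟩
      · exact absurd ((PySem.List.sorted_eq_nil_iff _ _ _).mp h) hne
      · exact ⟨m, tl, rfl⟩
    rw [hs, PySem.List.pyGetD_zero_cons]
    have hmem : m ∈ valA n t := by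
      have : m ∈ PySem.List.sorted (valA n t) (fun x => x.1 * x.2) true := by simp [hs]
      exact (PySem.List.mem_sorted _ _ _ _).mp this
    have hub : m.1 * m.2 ≤ (t / 2) * (t - t / 2) := by
      obtain ⟨_, _, h5⟩ := mem_valA.mp hmem
      exact prod_le t m.1 m.2 h5
    show m.1 * m.2 = t / 2 * (t - t / 2)
    have hlb : (t / 2) * (t - t / 2) ≤ m.1 * m.2 := by
      have hx : ((t / 2 : Int), t - t / 2) ∈ valA n t := mem_valA.mpr (by constructor <;> omega)
      exact PySem.List.key_head_sorted_rev_ge _ _ hs _ hx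
    omega

-- collapse both folds to sums of per-element contributions
theorem checkJoy_eq_sum (a b : List Int) :
    checkJoy a b =
      (((PySem.List.pyRange 0 a.length 1).map
        (fun i => cA (PySem.List.pyGetD a i 0) (PySem.List.pyGetD b i 0))).sum) := by
  unfold checkJoy
  rw [show (fun (joy : Int) (i : Int) =>
      let ai := PySem.List.pyGetD a i 0
      let inna := PySem.List.pyRange 1 (ai + 1) 1
      let dima := PySem.List.pyRange 1 (ai + 1) 1
      let val := inna.flatMap (fun x => dima.map (fun y => (x, y)))
      let val := val.filter (fun j => j.1 + j.2 == PySem.List.pyGetD b i 0)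
      if val.length = 0 then joy - 1
      else
        let v := PySem.List.pyGetD (PySem.List.sorted val (fun x => x.1 * x.2) true) 0 (0, 0)
        joy + v.1 * v.2) =
      (fun joy i => joy + cA (PySem.List.pyGetD a i 0) (PySem.List.pyGetD b i 0)) from by
    funext joy i
    simp only [cA, valA]
    split_ifs <;> ring]
  rw [PySem.List.foldl_add]
  ring

theorem checkJoy_alt_eq_sum (a b : List Int) :
    checkJoy_alt a b = ((a.zip b).map (fun p => cB p.1 p.2)).sum := by
  unfold checkJoy_alt
  rw [show (fun (joy : Int) (nt : Int × Int) =>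
      let x := PySem.Int.floordiv nt.2 2
      let y := nt.2 - x
      if 1 ≤ x ∧ y ≤ nt.1 then joy + x * y else joy - 1) =
      (fun joy nt => joy + cB nt.1 nt.2) from by
    funext joy nt
    simp only [cB]
    split_ifs <;> ring]
  rw [PySem.List.foldl_add]
  ring

theorem map_range_zip (f : Int → Int → Int) :
    ∀ (a b : List Int), a.length ≤ b.length →
      (List.range a.length).map (fun k => f (a.getD k 0) (b.getD k 0)) =
        (a.zip b).map (fun p => f p.1 p.2) := by
  intro a
  induction a with
  | nil => intro b _; simp
  | cons x a ih =>
    intro b hb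
    cases b with
    | nil => simp at hb
    | cons y b =>
      simp only [List.length_cons, List.range_succ_eq_map, List.map_cons, List.map_map,
        List.zip_cons_cons]
      congr 1
      have := ih b (by simpa using hb)
      simpa using this

theorem checkJoy_spec : Claim_equal_checkJoy := by
  intro a b _ hpre
  unfold Spec_checkJoy
  rw [checkJoy_eq_sum, checkJoy_alt_eq_sum]
  have h1 : (PySem.List.pyRange 0 (a.length : Int) 1).map
      (fun i => cA (PySem.List.pyGetD a i 0) (PySem.List.pyGetD b i 0)) =
      (List.range a.length).map (fun k => cA (a.getD k 0) (b.getD k 0)) := by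
    rw [PySem.List.pyRange_zero_nat]
    simp [List.map_map, Function.comp]
  rw [h1, map_range_zip _ a b hpre]
  exact congrArg List.sum (List.map_congr_left (fun (p : Int × Int) _ => cA_eq_cB p.1 p.2))
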